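-- pv_equiv track=rewrite | github.com/pypi-data/pypi-mirror-48 | packages/RelStorage/RelStorage-3.0a3-cp37-cp37m-macosx_10_14_x86_64.whl/relstorage/adapters/postgresql/mover.py | to_prepared_queries
-- ===== SOURCE A (Python) =====
-- def to_prepared_queries(name, queries, datatypes=()):
--     # Give correct datatypes for the queries, wherever possible.
--     # The number of parameters should be the same or more than the
--     # number of datatypes.
--     # datatypes is a sequence of strings.
--
--     # Maybe instead of having the adapter have to know about all the
--     # statements that need prepared, we could keep a registry?
--     if datatypes:
--         assert isinstance(datatypes, (list, tuple))
--         datatypes = ', '.join(datatypes)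
--         datatypes = ' (%s)' % (datatypes,)
--     else:
--         datatypes = ''
--
--     result = []
--     for q in queries:
--         if not isinstance(q, str):
--             # Unsupported marker
--             result.append(q)
--             continue
--
--         q = q.strip()
--         param_count = q.count('%s')
--         rep_count = 0
--         while rep_count < param_count:
--             rep_count += 1
--             q = q.replace('%s', '$' + str(rep_count), 1)
--         stmt = 'PREPARE {name}{datatypes} AS {query}'.format(
--             name=name, datatypes=datatypes, query=q
--         )
--         result.append(stmt)
--     return result
-- ===== SOURCE B (Python) =====
-- def to_prepared_queries(name, queries, datatypes=()):
--     # Single forward pass: split the stripped query on '%s' once, then stitch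
--     # the segments back together with '$1', '$2', ... between them.
--     if datatypes:
--         assert isinstance(datatypes, (list, tuple))
--         prefix = ' (%s)' % ', '.join(datatypes)
--     else:
--         prefix = ''
--     result = []
--     for q in queries:
--         if not isinstance(q, str):
--             result.append(q)
--             continue
--         first, *rest = q.strip().split('%s')
--         body = first + ''.join('$' + str(i) + seg for i, seg in enumerate(rest, 1))
--         result.append('PREPARE %s%s AS %s' % (name, prefix, body))
--     return result
-- ===== Notes on version B (the rewrite author's own statement) =====
-- stated objective: simpler
-- what changed: A counts '%s' occurrences and then repeatedly rescans the query from the start with replace(...,1) once per parameter; B splits the stripped query on '%s' once and stitches the segments back together with '$1','$2',... in a single forward pass.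
import Mathlib
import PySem

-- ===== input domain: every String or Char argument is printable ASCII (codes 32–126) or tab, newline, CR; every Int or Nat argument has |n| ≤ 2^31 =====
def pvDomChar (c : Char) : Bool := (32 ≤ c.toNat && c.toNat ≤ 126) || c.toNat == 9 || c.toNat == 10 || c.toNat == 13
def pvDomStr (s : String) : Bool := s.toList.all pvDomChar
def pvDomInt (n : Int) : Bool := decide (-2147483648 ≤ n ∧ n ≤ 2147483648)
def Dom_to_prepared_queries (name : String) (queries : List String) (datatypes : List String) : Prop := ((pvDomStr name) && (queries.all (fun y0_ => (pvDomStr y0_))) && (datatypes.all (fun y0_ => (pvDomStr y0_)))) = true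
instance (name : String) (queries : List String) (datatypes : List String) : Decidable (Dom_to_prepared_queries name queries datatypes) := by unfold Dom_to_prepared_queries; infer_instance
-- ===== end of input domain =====

-- B replaces A's count-then-repeatedly-replace-from-the-start loop by one split on '%s'
-- followed by a single stitching pass; objective: simpler (one forward pass, no repeated rescans).

-- the literal '%s' both Pythons search for
def pvPS : List Char := ['%', 's']

-- ===== PORT A =====
-- hand port of q.replace('%s', new, 1): replace the LEFTMOST occurrence of '%s' only
-- (exact for the nonempty needle '%s'; PySem.Chars.replace has no count argument)
def pvReplaceOnce (newRep : List Char) : List Char → List Char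
  | [] => []
  | c :: t =>
    if pvPS.isPrefixOf (c :: t) then newRep ++ (c :: t).drop pvPS.length
    else c :: pvReplaceOnce newRep t

-- the 'while rep_count < param_count' loop, transliterated as recursion on the
-- number of remaining iterations (param_count - rep_count), carrying rep_count
def pvRepLoop : Nat → Int → List Char → List Char
  | 0, _, q => q
  | k + 1, rep, q => pvRepLoop k (rep + 1) (pvReplaceOnce ('$' :: PySem.Int.toChars (rep + 1)) q)

def to_prepared_queries (name : String) (queries : List String) (datatypes : List String) : List String :=
  -- if datatypes: datatypes = ' (%s)' % ', '.join(datatypes)  else ''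
  let dts : List Char :=
    if datatypes ≠ [] then
      " (".toList ++ PySem.Chars.join ", ".toList (datatypes.map String.toList) ++ ")".toList
    else []
  -- result = []; for q in queries: … result.append(stmt)
  queries.foldl (fun result q =>
    let qs := PySem.Chars.strip q.toList
    let paramCount := PySem.Chars.count qs pvPS
    let qs2 := pvRepLoop paramCount 0 qs
    result ++ [String.ofList ("PREPARE ".toList ++ name.toList ++ dts ++ " AS ".toList ++ qs2)]) []

-- ===== PORT B =====
def to_prepared_queries_alt (name : String) (queries : List String) (datatypes : List String) : List String :=
  let pre : List Char :=
    if datatypes ≠ [] then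
      " (".toList ++ PySem.Chars.join ", ".toList (datatypes.map String.toList) ++ ")".toList
    else []
  queries.map (fun q =>
    -- first, *rest = q.strip().split('%s')  (split never returns []; the [] arm is unreachable)
    match PySem.Chars.splitOn (PySem.Chars.strip q.toList) pvPS with
    | [] => ""
    | first :: rest =>
      -- body = first + ''.join('$' + str(i) + seg for i, seg in enumerate(rest, 1))
      let body := first ++
        (List.flatten ((PySem.List.enumerate rest 1).map (fun p => '$' :: PySem.Int.toChars p.1 ++ p.2)))
      String.ofList ("PREPARE ".toList ++ name.toList ++ pre ++ " AS ".toList ++ body))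

-- ===== PRECONDITION & SPEC =====
def Spec_to_prepared_queries (name : String) (queries : List String) (datatypes : List String) (out : List String) : Prop := out = to_prepared_queries_alt name queries datatypes
instance (name : String) (queries : List String) (datatypes : List String) (out : List String) : Decidable (Spec_to_prepared_queries name queries datatypes out) := by unfold Spec_to_prepared_queries; infer_instance

-- ===== CLAIM (what is proved, stated in full; the proofs are below) =====
def Claim_equal_to_prepared_queries : Prop := ∀ (name : String) (queries : List String) (datatypes : List String), Dom_to_prepared_queries name queries datatypes → Spec_to_prepared_queries name queries datatypes (to_prepared_queries name queries datatypes)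

-- ===== LEMMAS AND PROOFS =====

-- proof-side mirror of str.split('%s') (leftmost, non-overlapping), structural
def pvSplit : List Char → List (List Char)
  | [] => [[]]
  | c :: t =>
    if pvPS.isPrefixOf (c :: t) then [] :: pvSplit (t.drop 1)
    else
      match pvSplit t with
      | [] => [[c]]
      | p :: r => (c :: p) :: r
termination_by l => l.length
decreasing_by
  · simp only [List.length_drop, List.length_cons]; omega
  · simp only [List.length_cons]; omega

-- proof-side mirror of q.count('%s')
def pvCnt : List Char → Nat
  | [] => 0
  | c :: t => if pvPS.isPrefixOf (c :: t) then pvCnt (t.drop 1) + 1 else pvCnt t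
termination_by l => l.length
decreasing_by
  · simp only [List.length_drop, List.length_cons]; omega
  · simp only [List.length_cons]; omega

-- interleaving '$1' '$2' … between the split segments
def pvBuild : Int → List (List Char) → List Char
  | _, [] => []
  | n, q :: r => ('$' :: PySem.Int.toChars (n + 1)) ++ q ++ pvBuild (n + 1) r

theorem pvSplit_ne_nil (l : List Char) : pvSplit l ≠ [] := by
  cases l with
  | nil => simp [pvSplit]
  | cons c t =>
    rw [pvSplit]
    by_cases hp : pvPS.isPrefixOf (c :: t) = true
    · simp [hp]
    · rw [if_neg hp]
      cases h : pvSplit t <;> simp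

theorem splitOn_go_eq (fuel : Nat) : ∀ (l cur : List Char) (acc : List (List Char)), l.length ≤ fuel →
    PySem.Chars.splitOn.go pvPS fuel l cur acc =
      acc.reverse ++ (cur.reverse ++ (pvSplit l).headI) :: (pvSplit l).tail := by
  induction fuel with
  | zero =>
    intro l cur acc h; cases l with
    | nil => simp [PySem.Chars.splitOn.go, pvSplit]
    | cons c t => simp at h
  | succ f ih =>
    intro l cur acc h
    cases l with
    | nil => simp [PySem.Chars.splitOn.go, pvSplit]
    | cons c t =>
      rw [PySem.Chars.splitOn.go]
      have hd : List.drop pvPS.length (c :: t) = t.drop 1 := by simp [pvPS]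
      simp only [List.length_cons] at h
      by_cases hp : pvPS.isPrefixOf (c :: t) = true
      · rw [if_pos hp, hd, ih _ _ _ (by simp only [List.length_drop]; omega)]
        conv_rhs => rw [pvSplit]
        rw [if_pos hp]
        rcases h' : pvSplit (t.drop 1) with _ | ⟨p, r⟩
        · exact absurd h' (pvSplit_ne_nil _)
        · simp
      · rw [if_neg hp, ih _ _ _ (by omega)]
        conv_rhs => rw [pvSplit]
        rw [if_neg hp]
        rcases h' : pvSplit t with _ | ⟨p, r⟩
        · exact absurd h' (pvSplit_ne_nil _)
        · simp

theorem pvPS_isPrefixOf_iff (l : List Char) :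
    pvPS.isPrefixOf l = true ↔ ∃ t, l = '%' :: 's' :: t := by
  rcases l with _ | ⟨a, _ | ⟨b, t⟩⟩
  · simp [pvPS]
  · simp [pvPS]
  · constructor
    · intro h
      simp [pvPS, List.isPrefixOf] at h
      exact ⟨t, by simp [← h.1, ← h.2]⟩
    · rintro ⟨t', ht⟩
      injection ht with h1 ht2
      injection ht2 with h2 _
      subst h1; subst h2
      simp [pvPS, List.isPrefixOf]

theorem length_pvSplit (l : List Char) : (pvSplit l).length = pvCnt l + 1 := by
  induction hn : l.length using Nat.strong_induction_on generalizing l with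
  | _ n ih =>
  cases l with
  | nil => simp [pvSplit, pvCnt]
  | cons c t =>
    simp only [List.length_cons] at hn
    rw [pvSplit, pvCnt]
    by_cases hp : pvPS.isPrefixOf (c :: t) = true
    · rw [if_pos hp, if_pos hp]
      have := ih ((t.drop 1).length) (by simp only [List.length_drop]; omega) _ rfl
      simp only [List.length_cons, this]
    · rw [if_neg hp, if_neg hp]
      rcases h' : pvSplit t with _ | ⟨p, r⟩
      · exact absurd h' (pvSplit_ne_nil _)
      · have := ih t.length (by omega) t rfl
        rw [h'] at this
        simpa using this

theorem pvSplit_singleton (l p : List Char) (h : pvSplit l = [p]) : l = p := by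
  induction hn : l.length using Nat.strong_induction_on generalizing l p with
  | _ n ih =>
  cases l with
  | nil => simp [pvSplit] at h; simp [h]
  | cons c t =>
    simp only [List.length_cons] at hn
    rw [pvSplit] at h
    by_cases hp : pvPS.isPrefixOf (c :: t) = true
    · rw [if_pos hp] at h
      injection h with h1 h2
      exact absurd h2 (pvSplit_ne_nil _)
    · rw [if_neg hp] at h
      rcases h' : pvSplit t with _ | ⟨p', r⟩
      · exact absurd h' (pvSplit_ne_nil _)
      · rw [h'] at h
        injection h with h1 h2
        subst h2
        have := ih t.length (by omega) t p' h' rfl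
        simp [← h1, this]

theorem pvSplit_cons_cons (l p q : List Char) (r : List (List Char))
    (h : pvSplit l = p :: q :: r) :
    ∃ l', l = p ++ (pvPS ++ l') ∧ pvSplit l' = q :: r ∧
      ∀ i < p.length, pvPS.isPrefixOf (p.drop i ++ (pvPS ++ l')) = false := by
  induction hn : l.length using Nat.strong_induction_on generalizing l p q r with
  | _ n ih =>
  cases l with
  | nil => rw [pvSplit] at h; injection h with _ h2; simp at h2
  | cons c t =>
    simp only [List.length_cons] at hn
    rw [pvSplit] at h
    by_cases hp : pvPS.isPrefixOf (c :: t) = true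
    · rw [if_pos hp] at h
      injection h with h1 h2
      obtain ⟨t', ht⟩ := (pvPS_isPrefixOf_iff _).1 hp
      injection ht with hc ht2
      subst hc; subst ht2
      refine ⟨t', ?_, ?_, ?_⟩
      · subst h1; simp [pvPS]
      · simpa using h2
      · subst h1; intro i hi; simp at hi
    · rw [if_neg hp] at h
      rcases h' : pvSplit t with _ | ⟨p', r'⟩
      · exact absurd h' (pvSplit_ne_nil _)
      · rw [h'] at h
        injection h with h1 h2
        rcases r' with _ | ⟨q', r''⟩
        · simp at h2
        · injection h2 with hq hr
          obtain ⟨l', hl1, hl2, hl3⟩ := ih t.length (by omega) t p' q' r'' h' rfl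
          rw [hq, hr] at hl2
          refine ⟨l', ?_, hl2, ?_⟩
          · subst h1; simp [hl1]
          · subst h1
            intro i hi
            cases i with
            | zero =>
              simp only [List.drop_zero, List.cons_append, ← hl1]
              simp only [Bool.not_eq_true] at hp
              exact hp
            | succ j =>
              simp only [List.drop_succ_cons]
              exact hl3 j (by simpa using hi)

theorem safe_transfer (a x y : List Char) (hy : y.head? ≠ some 's')
    (hx : ∀ i < a.length, pvPS.isPrefixOf (a.drop i ++ x) = false) :
    ∀ i < a.length, pvPS.isPrefixOf (a.drop i ++ y) = false := by
  intro i hi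
  rcases hd : a.drop i with _ | ⟨c, rest⟩
  · have : a.length ≤ i := by
      have := List.drop_eq_nil_iff.mp hd; omega
    omega
  rcases rest with _ | ⟨c2, rest2⟩
  · -- last position of a: a straddling occurrence would need y to start with 's'
    rcases y with _ | ⟨y0, yt⟩
    · simp [pvPS, List.isPrefixOf]
    · simp only [List.head?_cons, ne_eq, Option.some.injEq] at hy
      simp [pvPS, List.isPrefixOf]
      intro _ h2
      exact hy h2.symm
  · -- interior position: the two chars decide it, independent of the continuation
    have := hx i hi
    rw [hd] at this
    simp [pvPS, List.isPrefixOf, List.cons_append] at this ⊢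
    exact this

theorem safe_of_no_pct (a y : List Char) (ha : '%' ∉ a) :
    ∀ i < a.length, pvPS.isPrefixOf (a.drop i ++ y) = false := by
  intro i hi
  rcases hd : a.drop i with _ | ⟨c, rest⟩
  · have := List.drop_eq_nil_iff.mp hd; omega
  · have hc : c ∈ a := by
      have : c ∈ a.drop i := by rw [hd]; exact List.mem_cons_self
      exact List.mem_of_mem_drop this
    have : c ≠ '%' := fun h => ha (h ▸ hc)
    simp [pvPS, List.isPrefixOf]
    intro h; exact absurd h.symm this

theorem digitChar_ne_pct (n : Nat) : Nat.digitChar n ≠ '%' := by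
  by_cases h : n < 16
  · interval_cases n <;> decide
  · have hn : n - 16 + 16 = n := by omega
    rw [← hn]
    have e : Nat.digitChar (n - 16 + 16) = '*' := rfl
    rw [e]; decide

theorem toDigitsCore_no_pct (f : Nat) : ∀ (n : Nat) (acc : List Char), '%' ∉ acc →
    '%' ∉ Nat.toDigitsCore 10 f n acc := by
  induction f with
  | zero => intro n acc h; simpa [Nat.toDigitsCore] using h
  | succ f ih =>
    intro n acc h
    rw [Nat.toDigitsCore]
    split
    · intro hm
      rcases List.mem_cons.mp hm with h1 | h1
      · exact digitChar_ne_pct _ h1.symm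
      · exact h h1
    · apply ih
      intro hm
      rcases List.mem_cons.mp hm with h1 | h1
      · exact digitChar_ne_pct _ h1.symm
      · exact h h1

theorem pct_not_mem_dollar_toChars (n : Int) (hn : 0 ≤ n) :
    '%' ∉ '$' :: PySem.Int.toChars (n + 1) := by
  simp only [List.mem_cons, not_or]
  refine ⟨by decide, ?_⟩
  unfold PySem.Int.toChars
  rw [if_neg (by omega)]
  exact toDigitsCore_no_pct _ _ _ (by simp)

theorem pvSplit_append (a l : List Char)
    (ha : ∀ i < a.length, pvPS.isPrefixOf (a.drop i ++ l) = false) :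
    pvSplit (a ++ l) = (a ++ (pvSplit l).headI) :: (pvSplit l).tail := by
  induction a with
  | nil =>
    rcases h' : pvSplit l with _ | ⟨p, r⟩
    · exact absurd h' (pvSplit_ne_nil _)
    · simp [h']
  | cons c a' ih =>
    have h0 : pvPS.isPrefixOf ((c :: a') ++ l) = false := by
      simpa using ha 0 (by simp)
    rw [List.cons_append, pvSplit]
    rw [if_neg (fun hpre => by simp only [List.cons_append] at h0; rw [hpre] at h0; cases h0)]
    rw [ih (fun i hi => by simpa using ha (i + 1) (by simp; omega))]
    simp

theorem replaceOnce_eq (newRep : List Char) : ∀ (p l' : List Char),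
    (∀ i < p.length, pvPS.isPrefixOf (p.drop i ++ (pvPS ++ l')) = false) →
    pvReplaceOnce newRep (p ++ (pvPS ++ l')) = p ++ newRep ++ l' := by
  intro p
  induction p with
  | nil =>
    intro l' _
    simp only [List.nil_append]
    rw [pvReplaceOnce.eq_def]
    simp [pvPS, List.isPrefixOf]
  | cons c p' ih =>
    intro l' hsafe
    have h0 : pvPS.isPrefixOf ((c :: p') ++ (pvPS ++ l')) = false := by
      simpa using hsafe 0 (by simp)
    rw [List.cons_append, pvReplaceOnce]
    rw [if_neg (fun hpre => by simp only [List.cons_append] at h0; rw [hpre] at h0; cases h0)]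
    rw [ih l' (fun i hi => by simpa using hsafe (i + 1) (by simp; omega))]
    simp

theorem repLoop_eq : ∀ (r : List (List Char)) (p l : List Char) (rep : Int), 0 ≤ rep →
    pvSplit l = p :: r → pvRepLoop r.length rep l = p ++ pvBuild rep r := by
  intro r
  induction r with
  | nil =>
    intro p l rep _ h
    simp only [List.length_nil, pvRepLoop, pvBuild]
    simp [pvSplit_singleton l p h]
  | cons q r' ih =>
    intro p l rep hrep h
    obtain ⟨l', hl1, hl2, hsafe⟩ := pvSplit_cons_cons l p q r' h
    simp only [List.length_cons, pvRepLoop]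
    set newRep : List Char := '$' :: PySem.Int.toChars (rep + 1) with hnew
    have hrepl : pvReplaceOnce newRep l = p ++ newRep ++ l' := by
      rw [hl1]; exact replaceOnce_eq newRep p l' hsafe
    rw [hrepl]
    have hl'eq : pvSplit ((p ++ newRep) ++ l') = ((p ++ newRep) ++ q) :: r' := by
      have hsafe2 : ∀ i < (p ++ newRep).length, pvPS.isPrefixOf ((p ++ newRep).drop i ++ l') = false := by
        intro i hi
        by_cases hip : i < p.length
        · have := safe_transfer p (pvPS ++ l') (newRep ++ l')
            (by simp [hnew]) hsafe i hip
          simpa [List.drop_append_of_le_length (le_of_lt hip), List.append_assoc] using this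
        · have hin : i - p.length < newRep.length := by
            simp only [List.length_append] at hi; omega
          have := safe_of_no_pct newRep l' (pct_not_mem_dollar_toChars rep hrep) (i - p.length) hin
          have hdrop : (p ++ newRep).drop i = newRep.drop (i - p.length) := by
            rw [List.drop_append, List.drop_eq_nil_of_le (by omega)]
            simp
          rw [hdrop]
          exact this
      rw [pvSplit_append (p ++ newRep) l' hsafe2, hl2]
      simp
    rw [ih (p ++ newRep ++ q) (p ++ newRep ++ l') (rep + 1) (by omega) hl'eq]
    simp [pvBuild, hnew]

theorem enum_build (r : List (List Char)) : ∀ (n : Int),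
    List.flatten ((PySem.List.enumerate r (n + 1)).map (fun p => '$' :: PySem.Int.toChars p.1 ++ p.2)) =
      pvBuild n r := by
  induction r with
  | nil => intro n; simp [PySem.List.enumerate, pvBuild]
  | cons q r' ih =>
    intro n
    rw [PySem.List.enumerate, pvBuild]
    simp only [List.map_cons, List.flatten_cons]
    rw [ih (n + 1)]

theorem count_go_eq (fuel : Nat) : ∀ (l : List Char) (acc : Nat), l.length ≤ fuel →
    PySem.Chars.count.go pvPS fuel l acc = acc + pvCnt l := by
  induction fuel with
  | zero =>
    intro l acc h; cases l with
    | nil => simp [PySem.Chars.count.go, pvCnt]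
    | cons c t => simp at h
  | succ f ih =>
    intro l acc h
    cases l with
    | nil => simp [PySem.Chars.count.go, pvCnt]
    | cons c t =>
      rw [PySem.Chars.count.go]
      have hd : List.drop pvPS.length (c :: t) = t.drop 1 := by simp [pvPS]
      simp only [List.length_cons] at h
      by_cases hp : pvPS.isPrefixOf (c :: t) = true
      · rw [if_pos hp, hd, ih _ _ (by simp only [List.length_drop]; omega)]
        conv_rhs => rw [pvCnt]
        rw [if_pos hp]; omega
      · rw [if_neg hp, ih _ _ (by omega)]
        conv_rhs => rw [pvCnt]
        rw [if_neg hp]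

theorem count_eq_cnt (qs : List Char) : PySem.Chars.count qs pvPS = pvCnt qs := by
  rw [PySem.Chars.count, if_neg (by simp [pvPS])]
  rw [count_go_eq qs.length qs 0 le_rfl]; omega

theorem splitOn_eq_pvSplit (qs : List Char) : PySem.Chars.splitOn qs pvPS = pvSplit qs := by
  rw [PySem.Chars.splitOn, splitOn_go_eq (qs.length + 1) qs [] [] (by omega)]
  rcases h : pvSplit qs with _ | ⟨p, r⟩
  · exact absurd h (pvSplit_ne_nil _)
  · simp

theorem per_query (qs : List Char) :
    pvRepLoop (PySem.Chars.count qs pvPS) 0 qs =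
      (pvSplit qs).headI ++ pvBuild 0 (pvSplit qs).tail := by
  rcases h : pvSplit qs with _ | ⟨p, r⟩
  · exact absurd h (pvSplit_ne_nil _)
  · have hc : PySem.Chars.count qs pvPS = r.length := by
      rw [count_eq_cnt]
      have := length_pvSplit qs
      rw [h] at this
      simp at this
      omega
    rw [hc]
    simpa using repLoop_eq r p qs 0 le_rfl h

-- ===== VERDICT (by name: the statement is the Claim_ definition above) =====
theorem to_prepared_queries_spec : Claim_equal_to_prepared_queries := by
  intro name queries datatypes _
  unfold Spec_to_prepared_queries
  simp only [to_prepared_queries, to_prepared_queries_alt]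
  rw [PySem.List.foldl_append_singleton_eq_map]
  simp only [List.nil_append]
  apply List.map_congr_left
  intro q _
  rw [splitOn_eq_pvSplit]
  rcases h : pvSplit (PySem.Chars.strip q.toList) with _ | ⟨p, r⟩
  · exact absurd h (pvSplit_ne_nil _)
  · have := per_query (PySem.Chars.strip q.toList)
    rw [h] at this
    simp only [List.headI_cons, List.tail_cons] at this
    have he := enum_build r 0
    simp only [zero_add] at he
    rw [← he] at this
    rw [this]
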